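-- pv_equiv track=rewrite | github.com/Minidimi/QIRO_Routing | src/util/test_helpers.py | evaluate_tsp_solution
-- ===== SOURCE A (Python) =====
-- import copy
--
-- def evaluate_tsp_solution(solution, ord):
--     """
--     Helper function for the TSP to get the permutation of visited nodes from an assignment of variables.
--
--     Parameters:
--         solution: Array of binary variables in the QUBO encoding of the TSP
--         ord: Array of previously fixed nodes from QIRO
--     """
--     ord_copy = copy.deepcopy(ord)
--     n = sum([k < 0 for k in ord])
--     for l in range(len(solution)):
--         if solution[l] == 1:
--             t = int(l / n)
--             i = l - t * n
--             k = 0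
--             while k <= i:
--                 if k in ord:
--                     i += 1
--                 k += 1
--
--             for position in range(len(ord)):
--                 if ord[position] == -1:
--                     t -= 1
--                 if t < 0:
--                     t = position
--                     break
--             ord_copy[t] = i
--     return ord_copy
-- ===== SOURCE B (Python) =====
-- def evaluate_tsp_solution(solution, ord):
--     result = list(ord)
--     n = sum(v < 0 for v in ord)
--     if n == 0:
--         return result
--     # positions of the unfixed (-1) slots, and the first n node ids not yet used in ord
--     slots = [p for p, v in enumerate(ord) if v == -1]
--     fixed = set(ord)
--     free = [c for c in range(n + len(ord)) if c not in fixed][:n]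
--     for l in range(len(solution)):
--         if solution[l] == 1:
--             result[slots[l // n]] = free[l % n]
--     return result
-- ===== Notes on version B (the rewrite author's own statement) =====
-- stated objective: faster
-- what changed: B precomputes the list of -1 slot positions, the membership set of ord and the first n unused node ids once, then decodes every active variable with O(1) indexing, instead of A's per-variable inner while-loop over candidate nodes ('k in ord' list scans) and rescans of ord for the t-th -1 position.
-- outside the precondition, e.g. on evaluate_tsp_solution([0, 1], [-1]): A returns [0], B raises IndexError
import Mathlib
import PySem

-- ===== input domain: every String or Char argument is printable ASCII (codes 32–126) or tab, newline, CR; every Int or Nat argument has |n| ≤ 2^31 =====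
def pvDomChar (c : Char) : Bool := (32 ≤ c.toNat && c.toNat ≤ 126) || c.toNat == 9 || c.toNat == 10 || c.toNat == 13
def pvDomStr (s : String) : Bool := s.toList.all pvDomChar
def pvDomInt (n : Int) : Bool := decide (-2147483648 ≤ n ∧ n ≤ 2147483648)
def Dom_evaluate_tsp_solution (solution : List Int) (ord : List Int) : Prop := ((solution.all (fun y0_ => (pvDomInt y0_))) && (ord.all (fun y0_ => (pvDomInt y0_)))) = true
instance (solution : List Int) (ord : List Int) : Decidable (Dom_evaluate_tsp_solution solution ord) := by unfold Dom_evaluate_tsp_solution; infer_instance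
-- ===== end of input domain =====

-- B precomputes the -1 slot positions and the first n unused node ids once and decodes each active
-- variable by O(1) indexing, replacing A's per-variable inner scans of ord (objective: faster).

-- ===== PORT A =====
-- while k <= i: if k in ord: i += 1; k += 1   (fuel bounds the iteration count; the fuel chosen at
-- the call site exceeds the loop's real iteration count, so the port is exact — pvA_skip_eq_nthFree)
def pvA_skip (ord : List Int) : Nat → Int → Int → Int
  | 0, i, _ => i
  | fuel + 1, i, k =>
    if k ≤ i then pvA_skip ord fuel (if k ∈ ord then i + 1 else i) (k + 1) else i

-- for position in range(len(ord)): if ord[position] == -1: t -= 1; if t < 0: t = position; break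
def pvA_findpos : List Int → Int → Int → Int
  | [], t, _ => t
  | v :: rest, t, pos =>
    let t' := if v = -1 then t - 1 else t
    if t' < 0 then pos else pvA_findpos rest t' (pos + 1)

def evaluate_tsp_solution (solution : List Int) (ord : List Int) : List Int :=
  -- n = sum([k < 0 for k in ord])
  let n : Int := ((ord.countP (fun k => decide (k < 0)) : Nat) : Int)
  (List.range solution.length).foldl (fun acc l =>
    if solution.getD l 0 = 1 then
      -- t = int(l / n): equals floor division for 0 ≤ l, 0 < n (n > 0 whenever this branch runs, by Pre_)
      let t : Int := PySem.Int.floordiv (l : Int) n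
      let i : Int := (l : Int) - t * n
      let i' : Int := pvA_skip ord (i.toNat + ord.length + 1) i 0
      let t' : Int := pvA_findpos ord t 0
      PySem.List.pySetD acc t' i'   -- ord_copy[t] = i  (Python-exact incl. negative index)
    else acc) ord

-- ===== PORT B =====
-- slots = [p for p, v in enumerate(ord) if v == -1]
def pvB_slots : List Int → Int → List Int
  | [], _ => []
  | v :: rest, p => if v = -1 then p :: pvB_slots rest (p + 1) else pvB_slots rest (p + 1)

def evaluate_tsp_solution_alt (solution : List Int) (ord : List Int) : List Int :=
  let n : Int := ((ord.countP (fun v => decide (v < 0)) : Nat) : Int)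
  if n = 0 then ord
  else
    let slots : List Int := pvB_slots ord 0
    -- free = [c for c in range(n + len(ord)) if c not in fixed][:n]  (set(ord) membership = list membership)
    let free : List Int :=
      ((PySem.List.pyRange 0 (n + ord.length) 1).filter (fun c => decide (¬ c ∈ ord))).take n.toNat
    (List.range solution.length).foldl (fun acc l =>
      if solution.getD l 0 = 1 then
        PySem.List.pySetD acc (PySem.List.pyGetD slots (PySem.Int.floordiv (l : Int) n) 0)
          (PySem.List.pyGetD free (PySem.Int.mod (l : Int) n) 0)
      else acc) ord

-- ===== PRECONDITION & SPEC =====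
-- Pre_ restricts to the QUBO shape: whenever a variable l is active, ord has a negative entry
-- (n > 0; otherwise A raises ZeroDivisionError) and the row index l // n is below the number of
-- -1 slots (otherwise A's position loop ends without break and A writes through the leftover,
-- possibly negative, index — an artefact of A's loop state — while B raises IndexError).
def Pre_evaluate_tsp_solution (solution : List Int) (ord : List Int) : Prop :=
  ∀ l ∈ List.range solution.length, solution.getD l 0 = 1 →
    0 < ord.countP (fun k => decide (k < 0)) ∧
    l / ord.countP (fun k => decide (k < 0)) < ord.countP (fun k => decide (k = -1))
instance (solution : List Int) (ord : List Int) : Decidable (Pre_evaluate_tsp_solution solution ord) := by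
  unfold Pre_evaluate_tsp_solution; infer_instance

def pvWitness_evaluate_tsp_solution : List Int × List Int := ([1, 0, 0, 1], [-1, -1])

def Spec_evaluate_tsp_solution (solution : List Int) (ord : List Int) (out : List Int) : Prop := out = evaluate_tsp_solution_alt solution ord
instance (solution : List Int) (ord : List Int) (out : List Int) : Decidable (Spec_evaluate_tsp_solution solution ord out) := by unfold Spec_evaluate_tsp_solution; infer_instance

-- ===== CLAIM (what is proved, stated in full; the proofs are below) =====
def Claim_equal_evaluate_tsp_solution : Prop := ∀ (solution : List Int) (ord : List Int), Dom_evaluate_tsp_solution solution ord → Pre_evaluate_tsp_solution solution ord → Spec_evaluate_tsp_solution solution ord (evaluate_tsp_solution solution ord)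

-- ===== LEMMAS AND PROOFS =====

-- the j-th integer ≥ c not occurring in ord (fuel-bounded): the common value of A's skip loop
-- and of B's filtered range
def pvNthFree (ord : List Int) : Nat → Nat → Int → Int
  | 0, _, c => c
  | fuel + 1, j, c =>
    if c ∈ ord then pvNthFree ord fuel j (c + 1)
    else match j with
      | 0 => c
      | j + 1 => pvNthFree ord fuel j (c + 1)

lemma pv_filterLe_le (ord : List Int) (c : Int) :
    (ord.filter (fun v => decide (c + 1 ≤ v))).length ≤ (ord.filter (fun v => decide (c ≤ v))).length := by
  apply List.Sublist.length_le
  apply List.monotone_filter_right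
  intro x hx
  simp only [decide_eq_true_eq] at hx ⊢; omega

lemma pv_filterLe_lt (ord : List Int) (c : Int) (hc : c ∈ ord) :
    (ord.filter (fun v => decide (c + 1 ≤ v))).length < (ord.filter (fun v => decide (c ≤ v))).length := by
  induction ord with
  | nil => simp at hc
  | cons v rest ih =>
    have hle := pv_filterLe_le rest c
    rcases List.mem_cons.mp hc with h | h
    · subst h
      simp only [List.filter_cons, decide_eq_true_eq]
      rw [if_neg (by omega), if_pos (by omega)]
      simp only [List.length_cons]; omega
    · have := ih h
      simp only [List.filter_cons, decide_eq_true_eq]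
      by_cases h1 : c ≤ v <;> by_cases h2 : c + 1 ≤ v
      · rw [if_pos h2, if_pos h1]; simp only [List.length_cons]; omega
      · rw [if_neg h2, if_pos h1]; simp only [List.length_cons]; omega
      · omega
      · rw [if_neg h2, if_neg h1]; omega

lemma pvA_skip_gt (ord : List Int) (fuel : Nat) (i k : Int) (h : i < k) :
    pvA_skip ord fuel i k = i := by
  cases fuel with
  | zero => rfl
  | succ f => simp [pvA_skip, not_le.mpr h]

lemma pvA_skip_eq_nthFree (ord : List Int) :
    ∀ (fuel : Nat) (i k : Int), 0 ≤ k → k ≤ i →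
    (i - k).toNat + (ord.filter (fun v => decide (k ≤ v))).length < fuel →
    pvA_skip ord fuel i k = pvNthFree ord fuel (i - k).toNat k := by
  intro fuel
  induction fuel with
  | zero => intro i k _ _ h; omega
  | succ f ih =>
    intro i k hk hki hfuel
    simp only [pvA_skip, pvNthFree, if_pos hki]
    by_cases hmem : k ∈ ord
    · rw [if_pos hmem, if_pos hmem]
      have h1 : (i + 1 - (k + 1)).toNat = (i - k).toNat := by omega
      rw [ih (i+1) (k+1) (by omega) (by omega)
        (by have := pv_filterLe_lt ord k hmem; omega), h1]
    · rw [if_neg hmem, if_neg hmem]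
      rcases eq_or_lt_of_le hki with heq | hlt
      · subst heq
        rw [pvA_skip_gt ord f k (k+1) (by omega)]
        simp only [show (k - k).toNat = 0 from by omega]
      · have hj : (i - k).toNat = (i - (k+1)).toNat + 1 := by omega
        rw [hj]
        rw [ih i (k+1) (by omega) (by omega)
          (by have := pv_filterLe_le ord k; omega)]

lemma pvNthFree_succ (ord : List Int) :
    ∀ (fuel : Nat) (j : Nat) (c : Int),
    j + (ord.filter (fun v => decide (c ≤ v))).length < fuel →
    pvNthFree ord fuel j c = pvNthFree ord (fuel + 1) j c := by
  intro fuel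
  induction fuel with
  | zero => intro j c h; omega
  | succ f ih =>
    intro j c h
    simp only [pvNthFree]
    by_cases hmem : c ∈ ord
    · rw [if_pos hmem, if_pos hmem]
      exact ih j (c+1) (by have := pv_filterLe_lt ord c hmem; omega)
    · rw [if_neg hmem, if_neg hmem]
      cases j with
      | zero => rfl
      | succ j' => exact ih j' (c+1) (by have := pv_filterLe_le ord c; omega)

lemma pvNthFree_of_le (ord : List Int) (fuel1 fuel2 : Nat) (j : Nat) (c : Int)
    (h12 : fuel1 ≤ fuel2) (h : j + (ord.filter (fun v => decide (c ≤ v))).length < fuel1) :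
    pvNthFree ord fuel1 j c = pvNthFree ord fuel2 j c := by
  obtain ⟨d, rfl⟩ := Nat.exists_eq_add_of_le h12
  induction d with
  | zero => rfl
  | succ d' ihd =>
    rw [ihd (by omega), show fuel1 + (d' + 1) = (fuel1 + d') + 1 from by omega]
    exact pvNthFree_succ ord (fuel1 + d') j c (by omega)

lemma pvB_slots_length (ord : List Int) : ∀ pos : Int,
    (pvB_slots ord pos).length = ord.countP (fun v => decide (v = -1)) := by
  induction ord with
  | nil => intro pos; simp [pvB_slots]
  | cons v rest ih =>
    intro pos
    by_cases h : v = -1 <;> simp [pvB_slots, h, ih]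

lemma pvB_slots_getElem? (ord : List Int) : ∀ (pos : Int) (t : Nat),
    t < (pvB_slots ord pos).length →
    (pvB_slots ord pos)[t]? = some (pvA_findpos ord (t : Int) pos) := by
  induction ord with
  | nil => intro pos t h; simp [pvB_slots] at h
  | cons v rest ih =>
    intro pos t h
    by_cases hv : v = -1
    · cases t with
      | zero => simp [pvB_slots, hv, pvA_findpos]
      | succ t' =>
        simp only [pvB_slots, hv, if_pos, List.length_cons] at h ⊢
        rw [List.getElem?_cons_succ]
        rw [ih (pos + 1) t' (by simpa using h)]
        simp only [pvA_findpos]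
        rw [if_neg (by push_cast; omega)]
        norm_num
    · simp only [pvB_slots, hv, if_false] at h ⊢
      rw [ih (pos + 1) t h]
      simp only [pvA_findpos]
      rw [if_neg (by omega), if_neg hv]

lemma pv_filterRange_getElem? (ord : List Int) :
    ∀ (fuel : Nat) (c : Int) (j : Nat),
    j < (((PySem.List.pyRange c (c + (fuel : Int)) 1)).filter (fun v => decide (¬ v ∈ ord))).length →
    (((PySem.List.pyRange c (c + (fuel : Int)) 1)).filter (fun v => decide (¬ v ∈ ord)))[j]? =
      some (pvNthFree ord fuel j c) := by
  intro fuel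
  induction fuel with
  | zero =>
    intro c j h
    rw [PySem.List.pyRange_one_eq_nil (by omega)] at h
    simp at h
  | succ f ih =>
    intro c j h
    rw [PySem.List.pyRange_one_cons (by omega)] at h ⊢
    have hsh : c + 1 + (f : Int) = c + ((f + 1 : Nat) : Int) := by push_cast; omega
    by_cases hmem : c ∈ ord
    · rw [List.filter_cons, if_neg (by simp [hmem])] at h ⊢
      simp only [pvNthFree, if_pos hmem]
      have := ih (c + 1) j
      rw [hsh] at this
      exact this h
    · rw [List.filter_cons, if_pos (by simp [hmem])] at h ⊢
      cases j with
      | zero => simp [pvNthFree, hmem]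
      | succ j' =>
        rw [List.getElem?_cons_succ]
        simp only [pvNthFree, if_neg hmem]
        have := ih (c + 1) j'
        rw [hsh] at this
        exact this (by simpa using h)

lemma pv_filterRange_length (ord : List Int) (m : Nat) :
    (m : Nat) - ord.length ≤ (((PySem.List.pyRange 0 (m : Int) 1)).filter (fun v => decide (¬ v ∈ ord))).length := by
  have hlen : (PySem.List.pyRange 0 (m : Int) 1).length = m := by
    rw [PySem.List.length_pyRange_one]; omega
  have hsplit := (List.length_eq_length_filter_add (l := PySem.List.pyRange 0 (m : Int) 1) (fun v => decide (v ∈ ord))).symm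
  have hmemle : ((PySem.List.pyRange 0 (m : Int) 1).filter (fun v => decide (v ∈ ord))).length ≤ ord.length := by
    have hnd : ((PySem.List.pyRange 0 (m : Int) 1).filter (fun v => decide (v ∈ ord))).Nodup :=
      (PySem.List.nodup_pyRange_one 0 (m : Int)).filter _
    calc _ = ((PySem.List.pyRange 0 (m : Int) 1).filter (fun v => decide (v ∈ ord))).toFinset.card :=
        (List.toFinset_card_of_nodup hnd).symm
      _ ≤ ord.toFinset.card := Finset.card_le_card (by
          intro x hx; simp only [List.mem_toFinset, List.mem_filter, decide_eq_true_eq] at hx ⊢; exact hx.2)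
      _ ≤ ord.length := List.toFinset_card_le ord
  have hfun : (fun v : Int => decide (¬ v ∈ ord)) = (fun v => !(decide (v ∈ ord))) := by
    funext v; by_cases h : v ∈ ord <;> simp [h]
  rw [hfun]
  omega

lemma pv_foldl_fixed {α β : Type} (l : List β) (init : α) :
    l.foldl (fun a _ => a) init = init := by
  induction l generalizing init with
  | nil => rfl
  | cons x xs ih => exact ih init

-- ===== VERDICT (by name: the statement is the Claim_ definition above) =====
theorem evaluate_tsp_solution_spec : Claim_equal_evaluate_tsp_solution := by
  intro solution ord _ hpre
  unfold Spec_evaluate_tsp_solution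
  unfold evaluate_tsp_solution evaluate_tsp_solution_alt
  simp only []
  set nNat : Nat := ord.countP (fun k => decide (k < 0)) with hn
  by_cases h0 : ((nNat : Int)) = 0
  · rw [if_pos h0]
    calc _ = (List.range solution.length).foldl (fun (a : List Int) (_ : Nat) => a) ord :=
          PySem.List.foldl_congr_mem _ _ _ _ (by
            intro acc l hl
            by_cases h1 : solution.getD l 0 = 1
            · exact absurd (hpre l hl h1).1 (by omega)
            · rw [if_neg h1])
      _ = ord := pv_foldl_fixed _ ord
  · rw [if_neg h0]
    apply PySem.List.foldl_congr_mem
    intro acc l hl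
    by_cases h1 : solution.getD l 0 = 1
    · simp only [if_pos h1]
      obtain ⟨hnpos, hlt⟩ := hpre l hl h1
      rw [PySem.Int.floordiv_natCast l nNat]
      set t : Nat := l / nNat with ht
      -- the written index: A's position scan = B's slot-table lookup
      have hslot : pvA_findpos ord (t : Int) 0 =
          PySem.List.pyGetD (pvB_slots ord 0) ((t : Nat) : Int) 0 := by
        have hlen : t < (pvB_slots ord 0).length := by
          rw [pvB_slots_length ord 0]; exact hlt
        rw [PySem.List.pyGetD_natCast, List.getD_eq_getElem?_getD,
          pvB_slots_getElem? ord 0 t hlen, Option.getD_some]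
      -- the written value: A's skip loop = B's free-table lookup
      have hi : (l : Int) - ((t : Nat) : Int) * (nNat : Int) = PySem.Int.mod (l : Int) (nNat : Int) := by
        have hfm := PySem.Int.floordiv_mul_add_mod (l : Int) (nNat : Int)
        rw [PySem.Int.floordiv_natCast l nNat] at hfm
        linarith
      rw [hi, PySem.Int.mod_natCast l nNat]
      set j : Nat := l % nNat with hj
      have hjn : j < nNat := Nat.mod_lt l (by omega)
      have hfl0 : (ord.filter (fun v => decide ((0:Int) ≤ v))).length ≤ ord.length :=
        List.length_filter_le _ ord
      have hskip : pvA_skip ord (((j : Nat) : Int).toNat + ord.length + 1) ((j : Nat) : Int) 0 =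
          pvNthFree ord (j + ord.length + 1) j 0 := by
        have := pvA_skip_eq_nthFree ord (((j : Nat) : Int).toNat + ord.length + 1)
          ((j : Nat) : Int) 0 (by omega) (by omega) (by simp only [Int.toNat_natCast]; omega)
        simpa using this
      have hm : (0 : Int) + ((nNat + ord.length : Nat) : Int) = (nNat : Int) + (ord.length : Int) := by
        push_cast; omega
      have hflen := pv_filterRange_length ord (nNat + ord.length)
      have hjlen : j < (((PySem.List.pyRange 0 ((0 : Int) + ((nNat + ord.length : Nat) : Int)) 1)).filter
          (fun v => decide (¬ v ∈ ord))).length := by rw [zero_add]; omega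
      have hfree : PySem.List.pyGetD
          ((((PySem.List.pyRange 0 ((nNat : Int) + (ord.length : Int)) 1)).filter
            (fun c => decide (¬ c ∈ ord))).take ((nNat : Int)).toNat) (((j : Nat)) : Int) 0
          = pvNthFree ord (nNat + ord.length) j 0 := by
        rw [PySem.List.pyGetD_natCast, List.getD_eq_getElem?_getD]
        rw [show ((nNat : Int) + (ord.length : Int)) = (0 : Int) + ((nNat + ord.length : Nat) : Int) from hm.symm]
        rw [show ((nNat : Int)).toNat = nNat from by omega]
        rw [List.getElem?_take_of_lt hjn]
        have hx := pv_filterRange_getElem? ord (nNat + ord.length) 0 j hjlen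
        rw [zero_add] at hx
        rw [zero_add, hx, Option.getD_some]
      rw [hskip, hfree]
      rw [hslot]
      congr 1
      rcases le_total (j + ord.length + 1) (nNat + ord.length) with hle | hle
      · exact pvNthFree_of_le ord _ _ j 0 hle (by omega)
      · exact (pvNthFree_of_le ord _ _ j 0 hle (by omega)).symm
    · simp only [if_neg h1]
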